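-- pv_equiv track=rewrite | github.com/vishalshirke7/DSA | arrays/count-strictly-increasing-subarrays.py | countIncreasing
-- ===== SOURCE A (Python) =====
-- def countIncreasing(arr, n):
--     # code here
--     ans = 0
--     small_index = 0
--     for index in range(1, n):
--         if arr[index] > arr[index - 1]:
--             ans += index - small_index
--         else:
--             small_index = index
--     return ans
-- ===== SOURCE B (Python) =====
-- def countIncreasing(arr, n):
--     # Divide and conquer: count strictly increasing subarrays of arr[:n] as
--     # (count in left half) + (count in right half) + (crossing subarrays),
--     # where the crossing count is a*b for the maximal increasing suffix of
--     # the left half (length a) and prefix of the right half (length b),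
--     # provided the two halves join increasingly at the midpoint.
--     def solve(lo, hi):
--         if hi - lo <= 1:
--             return 0
--         mid = (lo + hi) // 2
--         total = solve(lo, mid) + solve(mid, hi)
--         if arr[mid] > arr[mid - 1]:
--             a, i = 1, mid - 1
--             while i > lo and arr[i] > arr[i - 1]:
--                 a += 1
--                 i -= 1
--             b, j = 1, mid
--             while j + 1 < hi and arr[j + 1] > arr[j]:
--                 b += 1
--                 j += 1
--             total += a * b
--         return total
--     return solve(0, n)
-- ===== Notes on version B (the rewrite author's own statement) =====
-- stated objective: alternative
-- what changed: Replaces A's single left-to-right scan with a start-pointer by a recursive divide-and-conquer: count increasing subarrays in each half and add the cross-boundary count a*b, where a and b are the maximal increasing suffix/prefix run lengths meeting at the midpoint.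
import Mathlib
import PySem

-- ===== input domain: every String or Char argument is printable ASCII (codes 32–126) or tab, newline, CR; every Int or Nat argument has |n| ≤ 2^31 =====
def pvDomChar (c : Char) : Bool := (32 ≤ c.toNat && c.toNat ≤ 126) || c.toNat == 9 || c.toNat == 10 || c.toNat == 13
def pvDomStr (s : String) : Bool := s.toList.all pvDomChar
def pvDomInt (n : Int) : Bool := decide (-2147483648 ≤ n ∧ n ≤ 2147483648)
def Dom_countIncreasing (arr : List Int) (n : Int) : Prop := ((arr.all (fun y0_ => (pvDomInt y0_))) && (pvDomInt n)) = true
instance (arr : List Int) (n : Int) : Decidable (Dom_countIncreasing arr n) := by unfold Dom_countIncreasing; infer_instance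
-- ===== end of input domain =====

-- B replaces A's single left-to-right scan by a divide-and-conquer recursion:
-- count in each half plus the cross-boundary count a*b of the maximal increasing
-- suffix/prefix runs meeting at the midpoint (alternative algorithm, same results).

-- ===== PORT A =====
def countIncreasing (arr : List Int) (n : Int) : Int :=
  -- ans, small_index threaded through the loop over range(1, n)
  let r := (PySem.List.pyRange 1 n 1).foldl
    (fun (st : Int × Int) index =>
      if PySem.List.pyGetD arr index 0 > PySem.List.pyGetD arr (index - 1) 0 then
        (st.1 + (index - st.2), st.2)
      else
        (st.1, index))
    (0, 0)
  r.1

-- ===== PORT B =====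
-- termination helper for the midpoint recursion (cited by name in decreasing_by)
theorem pv_mid_bounds (lo hi : Int) (h : ¬ hi - lo ≤ 1) :
    lo < PySem.Int.floordiv (lo + hi) 2 ∧ PySem.Int.floordiv (lo + hi) 2 < hi := by
  rw [PySem.Int.floordiv_eq_ediv_of_pos (by norm_num)]
  omega

-- the `while i > lo and arr[i] > arr[i-1]` loop accumulating a
def pvChainL (arr : List Int) (lo i a : Int) : Int :=
  if h : lo < i ∧ PySem.List.pyGetD arr i 0 > PySem.List.pyGetD arr (i - 1) 0 then
    pvChainL arr lo (i - 1) (a + 1)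
  else a
termination_by (i - lo).toNat
decreasing_by omega

-- the `while j + 1 < hi and arr[j+1] > arr[j]` loop accumulating b
def pvChainR (arr : List Int) (hi j b : Int) : Int :=
  if h : j + 1 < hi ∧ PySem.List.pyGetD arr (j + 1) 0 > PySem.List.pyGetD arr j 0 then
    pvChainR arr hi (j + 1) (b + 1)
  else b
termination_by (hi - j).toNat
decreasing_by omega

-- solve(lo, hi)
def pvSolve (arr : List Int) (lo hi : Int) : Int :=
  if _h : hi - lo ≤ 1 then 0
  else
    pvSolve arr lo (PySem.Int.floordiv (lo + hi) 2) +
    pvSolve arr (PySem.Int.floordiv (lo + hi) 2) hi +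
    (if PySem.List.pyGetD arr (PySem.Int.floordiv (lo + hi) 2) 0 >
        PySem.List.pyGetD arr (PySem.Int.floordiv (lo + hi) 2 - 1) 0 then
       pvChainL arr lo (PySem.Int.floordiv (lo + hi) 2 - 1) 1 *
       pvChainR arr hi (PySem.Int.floordiv (lo + hi) 2) 1
     else 0)
termination_by (hi - lo).toNat
decreasing_by
  · have := pv_mid_bounds lo hi _h; omega
  · have := pv_mid_bounds lo hi _h; omega

def countIncreasing_alt (arr : List Int) (n : Int) : Int := pvSolve arr 0 n

-- ===== PRECONDITION & SPEC =====
-- Python A raises IndexError when n exceeds len(arr); exactly those inputs are excluded.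
def Pre_countIncreasing (arr : List Int) (n : Int) : Prop := n ≤ arr.length
instance (arr : List Int) (n : Int) : Decidable (Pre_countIncreasing arr n) := by
  unfold Pre_countIncreasing; infer_instance
def pvWitness_countIncreasing : List Int × Int := ([1, 2, 2, 3], 4)

def Spec_countIncreasing (arr : List Int) (n : Int) (out : Int) : Prop := out = countIncreasing_alt arr n
instance (arr : List Int) (n : Int) (out : Int) : Decidable (Spec_countIncreasing arr n out) := by unfold Spec_countIncreasing; infer_instance

-- ===== CLAIM (what is proved, stated in full; the proofs are below) =====
def Claim_equal_countIncreasing : Prop := ∀ (arr : List Int) (n : Int), Dom_countIncreasing arr n → Pre_countIncreasing arr n → Spec_countIncreasing arr n (countIncreasing arr n)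

-- ===== LEMMAS AND PROOFS =====

-- proof-side devices: the triangular number, the run-length fold, the prefix-streak
-- length E and the suffix-run length L; both ports are reduced to the run-length fold.
def pvTri (x : Int) : Int := PySem.Int.floordiv (x * (x - 1)) 2

def pvStep (arr : List Int) (st : Int × Int) (i : Int) : Int × Int :=
  if PySem.List.pyGetD arr i 0 > PySem.List.pyGetD arr (i - 1) 0 then
    (st.1, st.2 + 1)
  else
    (st.1 + pvTri st.2, 1)

def pvFlush (st : Int × Int) : Int := st.1 + pvTri st.2

def pvRL (arr : List Int) (lo hi : Int) : Int :=
  pvFlush ((PySem.List.pyRange (lo + 1) hi 1).foldl (pvStep arr) (0, 1))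

def pvE (arr : List Int) (hi m : Int) : Int :=
  if h : m < hi ∧ PySem.List.pyGetD arr m 0 > PySem.List.pyGetD arr (m - 1) 0 then
    1 + pvE arr hi (m + 1)
  else 0
termination_by (hi - m).toNat
decreasing_by omega

def pvL (arr : List Int) (lo i : Int) : Int :=
  if h : lo < i ∧ PySem.List.pyGetD arr i 0 > PySem.List.pyGetD arr (i - 1) 0 then
    1 + pvL arr lo (i - 1)
  else 0
termination_by (i - lo).toNat
decreasing_by omega

theorem pv_tri_two_mul (x : Int) : 2 * pvTri x = x * (x - 1) := by
  obtain ⟨t, ht⟩ := Int.even_mul_succ_self (x - 1)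
  have h1 : x * (x - 1) = 2 * t := by nlinarith [ht]
  rw [pvTri, h1, PySem.Int.floordiv_eq_ediv_of_pos (by norm_num),
      Int.mul_ediv_cancel_left _ (by norm_num)]

theorem pv_tri_one : pvTri 1 = 0 := by decide

-- A's loop invariant: run = index - small_index and A's accumulator leads the
-- run fold's by the triangle of the current run length
theorem pv_loop (arr : List Int) :
    ∀ (k : Nat) (a n ans1 si ans2 run : Int), (n - a).toNat = k →
    run = a - si → ans1 = ans2 + pvTri run →
    ((PySem.List.pyRange a n 1).foldl
      (fun (st : Int × Int) index =>
        if PySem.List.pyGetD arr index 0 > PySem.List.pyGetD arr (index - 1) 0 then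
          (st.1 + (index - st.2), st.2)
        else
          (st.1, index)) (ans1, si)).1 =
    pvFlush ((PySem.List.pyRange a n 1).foldl (pvStep arr) (ans2, run)) := by
  intro k
  induction k with
  | zero =>
    intro a n ans1 si ans2 run hk hrun hinv
    rw [PySem.List.pyRange_one_eq_nil (by omega)]
    simpa [pvFlush] using hinv
  | succ k ih =>
    intro a n ans1 si ans2 run hk hrun hinv
    rw [PySem.List.pyRange_one_cons (by omega)]
    simp only [List.foldl_cons, pvStep]
    by_cases hc : PySem.List.pyGetD arr a 0 > PySem.List.pyGetD arr (a - 1) 0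
    · simp only [if_pos hc]
      refine ih (a + 1) n (ans1 + (a - si)) si ans2 (run + 1) (by omega) (by omega) ?_
      have h1 := pv_tri_two_mul run
      have h2 := pv_tri_two_mul (run + 1)
      have : run = a - si := hrun
      nlinarith [h1, h2, hinv]
    · simp only [if_neg hc]
      exact ih (a + 1) n ans1 a (ans2 + pvTri run) 1 (by omega) (by omega)
        (by rw [hinv, pv_tri_one]; ring)

-- A equals the run fold
theorem pv_A_eq_RL (arr : List Int) (n : Int) : countIncreasing arr n = pvRL arr 0 n := by
  unfold countIncreasing pvRL
  have h := pv_loop arr (n - 1).toNat 1 n 0 0 0 1 (by omega) (by norm_num)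
    (by rw [pv_tri_one]; ring)
  simpa using h

-- chain loops in terms of pvL / pvE
theorem pv_chainL_eq (arr : List Int) :
    ∀ (k : Nat) (lo i a : Int), (i - lo).toNat = k →
    pvChainL arr lo i a = a + pvL arr lo i := by
  intro k
  induction k with
  | zero =>
    intro lo i a hk
    rw [pvChainL, pvL]
    have h : ¬ (lo < i ∧ PySem.List.pyGetD arr i 0 > PySem.List.pyGetD arr (i - 1) 0) := by
      intro ⟨h1, _⟩; omega
    rw [dif_neg h, dif_neg h]; ring
  | succ k ih =>
    intro lo i a hk
    rw [pvChainL, pvL]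
    by_cases h : lo < i ∧ PySem.List.pyGetD arr i 0 > PySem.List.pyGetD arr (i - 1) 0
    · rw [dif_pos h, dif_pos h, ih lo (i - 1) (a + 1) (by omega)]; ring
    · rw [dif_neg h, dif_neg h]; ring

theorem pv_chainR_eq (arr : List Int) :
    ∀ (k : Nat) (hi j b : Int), (hi - j).toNat = k →
    pvChainR arr hi j b = b + pvE arr hi (j + 1) := by
  intro k
  induction k with
  | zero =>
    intro hi j b hk
    rw [pvChainR, pvE]
    have h : ¬ (j + 1 < hi ∧ PySem.List.pyGetD arr (j + 1) 0 > PySem.List.pyGetD arr j 0) := by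
      intro ⟨h1, _⟩; omega
    rw [dif_neg h, dif_neg (by simpa using h)]; ring
  | succ k ih =>
    intro hi j b hk
    rw [pvChainR, pvE]
    by_cases h : j + 1 < hi ∧ PySem.List.pyGetD arr (j + 1) 0 > PySem.List.pyGetD arr j 0
    · rw [dif_pos h, dif_pos (by simpa using h), ih hi (j + 1) (b + 1) (by omega)]; ring
    · rw [dif_neg h, dif_neg (by simpa using h)]; ring

-- shift lemma: starting the run fold with run length r instead of 1 changes the
-- flushed result by the triangles over the initial streak E
theorem pv_shift (arr : List Int) :
    ∀ (k : Nat) (m hi c r : Int), (hi - m).toNat = k →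
    pvFlush ((PySem.List.pyRange m hi 1).foldl (pvStep arr) (c, r)) + pvTri (1 + pvE arr hi m) =
    c + pvFlush ((PySem.List.pyRange m hi 1).foldl (pvStep arr) (0, 1)) + pvTri (r + pvE arr hi m) := by
  intro k
  induction k with
  | zero =>
    intro m hi c r hk
    rw [PySem.List.pyRange_one_eq_nil (by omega)]
    rw [pvE]
    have h : ¬ (m < hi ∧ PySem.List.pyGetD arr m 0 > PySem.List.pyGetD arr (m - 1) 0) := by
      intro ⟨h1, _⟩; omega
    rw [dif_neg h]
    simp only [List.foldl_nil, pvFlush, pv_tri_one, add_zero]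
  | succ k ih =>
    intro m hi c r hk
    rw [PySem.List.pyRange_one_cons (by omega), pvE]
    simp only [List.foldl_cons, pvStep]
    by_cases hc : PySem.List.pyGetD arr m 0 > PySem.List.pyGetD arr (m - 1) 0
    · rw [dif_pos ⟨by omega, hc⟩]
      simp only [if_pos hc]
      have h1 := ih (m + 1) hi c (r + 1) (by omega)
      have h2 := ih (m + 1) hi 0 (1 + 1) (by omega)
      rw [show r + (1 + pvE arr hi (m + 1)) = r + 1 + pvE arr hi (m + 1) from by ring,
          show (1 : Int) + (1 + pvE arr hi (m + 1)) = 1 + 1 + pvE arr hi (m + 1) from by ring]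
      linarith [h1, h2]
    · rw [dif_neg (by intro ⟨_, h⟩; exact hc h)]
      simp only [if_neg hc]
      have h1 := ih (m + 1) hi (c + pvTri r) 1 (by omega)
      have h2 := ih (m + 1) hi (0 + pvTri 1) 1 (by omega)
      rw [show (1 : Int) + 0 = 1 from by ring, show r + (0 : Int) = r from by ring]
      linarith [h1, h2, pv_tri_one]

-- the divide-and-conquer solve equals the run fold
theorem pv_solve_eq_RL (arr : List Int) :
    ∀ (k : Nat) (lo hi : Int), (hi - lo).toNat = k →
    pvSolve arr lo hi = pvRL arr lo hi := by
  intro k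
  induction k using Nat.strong_induction_on with
  | _ k ih =>
    intro lo hi hk
    rw [pvSolve]
    by_cases hbase : hi - lo ≤ 1
    · rw [dif_pos hbase]
      unfold pvRL
      rw [PySem.List.pyRange_one_eq_nil (by omega)]
      simp [pvFlush, pv_tri_one]
    · rw [dif_neg hbase]
      obtain ⟨hm1, hm2⟩ := pv_mid_bounds lo hi hbase
      set mid := PySem.Int.floordiv (lo + hi) 2 with hmid
      -- split the run fold of [lo+1, hi) at mid
      have hsplit : PySem.List.pyRange (lo + 1) hi 1 =
          PySem.List.pyRange (lo + 1) mid 1 ++ PySem.List.pyRange mid hi 1 :=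
        PySem.List.pyRange_one_append _ _ _ (by omega) (by omega)
      set pL : Int × Int := (PySem.List.pyRange (lo + 1) mid 1).foldl (pvStep arr) (0, 1) with hpL
      have hRLlo : pvRL arr lo hi =
          pvFlush ((PySem.List.pyRange mid hi 1).foldl (pvStep arr) pL) := by
        rw [pvRL, hsplit, List.foldl_append, hpL]
      -- second component of pL is the suffix run length 1 + pvL lo (mid-1)
      have hsnd : ∀ (j : Nat) (m : Int), lo + 1 ≤ m → (m - (lo + 1)).toNat = j →
          ((PySem.List.pyRange (lo + 1) m 1).foldl (pvStep arr) (0, 1)).2 =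
          1 + pvL arr lo (m - 1) := by
        intro j
        induction j with
        | zero =>
          intro m hm hj
          rw [PySem.List.pyRange_one_eq_nil (by omega), pvL]
          rw [dif_neg (by intro ⟨h1, _⟩; omega)]
          simp
        | succ j ihj =>
          intro m hm hj
          have hstep : PySem.List.pyRange (lo + 1) m 1 =
              PySem.List.pyRange (lo + 1) (m - 1) 1 ++ [m - 1] := by
            have h := PySem.List.pyRange_one_succ_right (a := lo + 1) (b := m - 1) (by omega)
            rw [sub_add_cancel] at h
            exact h
          rw [hstep, List.foldl_append]
          simp only [List.foldl_cons, List.foldl_nil, pvStep]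
          rw [ihj (m - 1) (by omega) (by omega)]
          by_cases hc : PySem.List.pyGetD arr (m - 1) 0 > PySem.List.pyGetD arr (m - 1 - 1) 0
          · rw [if_pos hc,
                show pvL arr lo (m - 1) = 1 + pvL arr lo (m - 1 - 1) from by
                  rw [pvL, dif_pos ⟨by omega, hc⟩]]
            simp
            omega
          · rw [if_neg hc,
                show pvL arr lo (m - 1) = 0 from by
                  rw [pvL, dif_neg (by intro ⟨_, h⟩; exact hc h)]]
            simp
      have hpL2 : pL.2 = 1 + pvL arr lo (mid - 1) :=
        hsnd (mid - (lo + 1)).toNat mid (by omega) rfl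
      -- flush of pL is pvRL lo mid
      have hpL1 : pvFlush pL = pvRL arr lo mid := by rw [pvRL, hpL]
      -- shift the continuation over [mid, hi)
      have hE := pv_shift arr (hi - mid).toNat mid hi pL.1 pL.2 rfl
      set E := pvE arr hi mid with hEdef
      set r := pL.2 with hrdef
      -- evaluate the (0,1) fold over [mid, hi) by one step
      have hcons : PySem.List.pyRange mid hi 1 = mid :: PySem.List.pyRange (mid + 1) hi 1 :=
        PySem.List.pyRange_one_cons (by omega)
      have hRLmid : pvRL arr mid hi =
          pvFlush ((PySem.List.pyRange (mid + 1) hi 1).foldl (pvStep arr) (0, 1)) := rfl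
      by_cases hc : PySem.List.pyGetD arr mid 0 > PySem.List.pyGetD arr (mid - 1) 0
      · rw [if_pos hc]
        have hEpos : E = 1 + pvE arr hi (mid + 1) := by
          rw [hEdef]; conv_lhs => rw [pvE]
          rw [dif_pos ⟨by omega, hc⟩]
        have h01 : pvFlush ((PySem.List.pyRange mid hi 1).foldl (pvStep arr) (0, 1)) =
            pvRL arr mid hi + E := by
          rw [hcons]
          simp only [List.foldl_cons, pvStep, if_pos hc]
          have hsh := pv_shift arr (hi - (mid + 1)).toNat (mid + 1) hi 0 (1 + 1) rfl
          have hE' : pvE arr hi (mid + 1) = E - 1 := by omega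
          rw [hE'] at hsh
          rw [show (1 : Int) + (E - 1) = E from by ring,
              show (1 : Int) + 1 + (E - 1) = E + 1 from by ring] at hsh
          have htri : pvTri (E + 1) = pvTri E + E := by
            have h1 := pv_tri_two_mul E
            have h2 := pv_tri_two_mul (E + 1)
            nlinarith [h1, h2]
          rw [hRLmid]
          linarith [hsh, htri]
        -- chain values
        have ha : pvChainL arr lo (mid - 1) 1 = 1 + pvL arr lo (mid - 1) :=
          pv_chainL_eq arr (mid - 1 - lo).toNat lo (mid - 1) 1 rfl
        have hb : pvChainR arr hi mid 1 = 1 + pvE arr hi (mid + 1) :=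
          pv_chainR_eq arr (hi - mid).toNat hi mid 1 rfl
        rw [ih (mid - lo).toNat (by omega) lo mid (by omega),
            ih (hi - mid).toNat (by omega) mid hi (by omega)]
        rw [hRLlo]
        have hflush : pvFlush pL = pL.1 + pvTri r := rfl
        rw [ha, hb, ← hpL2, ← hEpos]
        have hfold : ((PySem.List.pyRange mid hi 1).foldl (pvStep arr) pL) =
            ((PySem.List.pyRange mid hi 1).foldl (pvStep arr) (pL.1, r)) := rfl
        rw [hfold, ← hpL1, hflush]
        -- the key triangular identity: pvTri r + r*E = E + pvTri (r+E) - pvTri (1+E)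
        have key : pvTri r + r * E + pvTri (1 + E) = E + pvTri (r + E) := by
          have h1 := pv_tri_two_mul r
          have h2 := pv_tri_two_mul (r + E)
          have h3 := pv_tri_two_mul (1 + E)
          nlinarith [h1, h2, h3]
        rw [h01] at hE
        linarith [hE, key]
      · rw [if_neg hc]
        have hE0 : E = 0 := by
          rw [hEdef]; rw [pvE, dif_neg (by intro ⟨_, h⟩; exact hc h)]
        have h01 : pvFlush ((PySem.List.pyRange mid hi 1).foldl (pvStep arr) (0, 1)) =
            pvRL arr mid hi := by
          rw [hcons]
          simp only [List.foldl_cons, pvStep, if_neg hc, pv_tri_one]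
          rw [hRLmid]
          norm_num
        rw [ih (mid - lo).toNat (by omega) lo mid (by omega),
            ih (hi - mid).toNat (by omega) mid hi (by omega)]
        rw [hRLlo, ← hpL1]
        have hflush : pvFlush pL = pL.1 + pvTri r := rfl
        rw [hflush]
        have hfold : ((PySem.List.pyRange mid hi 1).foldl (pvStep arr) pL) =
            ((PySem.List.pyRange mid hi 1).foldl (pvStep arr) (pL.1, r)) := rfl
        rw [hfold]
        have hgoal := hE
        rw [h01, hE0,
            show (1 : Int) + 0 = 1 from by ring,
            show r + (0 : Int) = r from by ring] at hgoal
        linarith [hgoal, pv_tri_one]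

-- ===== VERDICT (by name: the statement is the Claim_ definition above) =====
theorem countIncreasing_spec : Claim_equal_countIncreasing := by
  intro arr n _ _
  unfold Spec_countIncreasing countIncreasing_alt
  rw [pv_A_eq_RL, pv_solve_eq_RL arr (n - 0).toNat 0 n rfl]
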